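-- pv_equiv track=rewrite | github.com/lromeros/wallbreakers2019 | week3/partition-labels.py | build_intervals_dict
-- ===== SOURCE A (Python) =====
-- def build_intervals_dict(S: str):
--     intervals = {}
--
--     for i in range(len(S)):
--         if intervals.get(S[i]) is None:
--             intervals[S[i]] = [i, i+1]
--         else:
--             intervals[S[i]][1] = i +1
--
--     return intervals
-- ===== SOURCE B (Python) =====
-- def build_intervals_dict(S: str):
--     return {c: [S.find(c), S.rfind(c) + 1] for c in dict.fromkeys(S)}
-- ===== Notes on version B (the rewrite author's own statement) =====
-- stated objective: idiomatic
-- what changed: Replaced A's single accumulating pass that mutates interval lists in a dict with a dict comprehension over the order-preserving deduplicated characters, computing each interval directly from first (str.find) and last (str.rfind) occurrence lookups.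
import Mathlib
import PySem

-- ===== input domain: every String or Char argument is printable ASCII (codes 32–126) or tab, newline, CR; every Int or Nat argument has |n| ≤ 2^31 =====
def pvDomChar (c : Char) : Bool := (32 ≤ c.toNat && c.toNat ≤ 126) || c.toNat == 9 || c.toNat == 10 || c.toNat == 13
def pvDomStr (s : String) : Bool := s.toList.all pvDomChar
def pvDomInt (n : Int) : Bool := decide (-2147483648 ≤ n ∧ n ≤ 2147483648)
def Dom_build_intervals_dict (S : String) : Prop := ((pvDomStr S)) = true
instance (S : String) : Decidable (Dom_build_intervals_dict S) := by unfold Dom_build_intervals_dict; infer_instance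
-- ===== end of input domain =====

-- B replaces A's single accumulating pass (which grows and mutates a dict of intervals) with a
-- dict comprehension over the order-preserving deduplicated characters, computing each interval
-- directly by first/last-occurrence lookups (objective: idiomatic; same return value).

-- ===== PORT A =====
-- one loop iteration of A: i is the index, S[i] the key (a 1-char string)
def buildStepA (cs : List Char) (intervals : PySem.Dict String (List Int)) (i : Int) :
    PySem.Dict String (List Int) :=
  match PySem.List.pyGet? cs i with
  | none => intervals              -- unreachable: i ∈ range(len(S))
  | some c =>
      match intervals.get? (String.ofList [c]) with
      | none => intervals.insert (String.ofList [c]) [i, i + 1]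
      | some _ => intervals.modify (String.ofList [c]) [] (fun v => v.set 1 (i + 1))

def build_intervals_dict (S : String) : List (String × List Int) :=
  ((PySem.List.pyRange 0 (PySem.Str.len S) 1).foldl (buildStepA S.toList) PySem.Dict.empty).items

-- ===== PORT B =====
-- {c: [S.find(c), S.rfind(c) + 1] for c in dict.fromkeys(S)}
def build_intervals_dict_alt (S : String) : List (String × List Int) :=
  (PySem.List.dedup S.toList).map (fun c =>
    (String.ofList [c], [PySem.Str.find S (String.ofList [c]), PySem.Str.rfind S (String.ofList [c]) + 1]))

-- ===== PRECONDITION & SPEC =====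
def Spec_build_intervals_dict (S : String) (out : List (String × List Int)) : Prop := out = build_intervals_dict_alt S
instance (S : String) (out : List (String × List Int)) : Decidable (Spec_build_intervals_dict S out) := by unfold Spec_build_intervals_dict; infer_instance

-- ===== CLAIM (what is proved, stated in full; the proofs are below) =====
def Claim_equal_build_intervals_dict : Prop := ∀ (S : String), Dom_build_intervals_dict S → Spec_build_intervals_dict S (build_intervals_dict S)

-- ===== LEMMAS AND PROOFS =====

-- B's result expressed on the character list
def intervalsOf (cs : List Char) : List (String × List Int) :=
  (PySem.List.dedup cs).map (fun c =>
    (String.ofList [c], [PySem.Chars.find cs [c], PySem.Chars.rfind cs [c] + 1]))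

theorem keyOf_inj : Function.Injective (fun c => String.ofList [c]) := by
  intro a b h
  have := congrArg String.toList h
  simpa using this

-- first occurrence of a character already in p is unchanged by appending c
theorem find_go_append_mem (d c : Char) (p : List Char) (h : d ∈ p) (k : Nat) :
    PySem.Chars.find.go [d] (p ++ [c]) k = PySem.Chars.find.go [d] p k := by
  induction p generalizing k with
  | nil => simp at h
  | cons a t ih =>
      have hmem := List.mem_cons.mp h
      simp only [List.cons_append, PySem.Chars.find.go]
      by_cases hda : d = a
      · simp [List.isPrefixOf, hda]
      · have hd : d ∈ t := hmem.resolve_left hda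
        have h1 : [d].isPrefixOf (a :: (t ++ [c])) = false := by simp [List.isPrefixOf, hda]
        have h2 : [d].isPrefixOf (a :: t) = false := by simp [List.isPrefixOf, hda]
        simp [h1, h2, ih hd]

theorem find_go_append_not_mem (c : Char) (p : List Char) (h : c ∉ p) (k : Nat) :
    PySem.Chars.find.go [c] (p ++ [c]) k = (k : Int) + p.length := by
  induction p generalizing k with
  | nil => simp [PySem.Chars.find.go, List.isPrefixOf]
  | cons a t ih =>
      have hac : c ≠ a := fun e => h (by simp [e])
      have hpre : [c].isPrefixOf (a :: (t ++ [c])) = false := by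
        simp [List.isPrefixOf, hac]
      simp only [List.cons_append, PySem.Chars.find.go, hpre]
      have := ih (fun hm => h (by simp [hm])) (k + 1)
      simp only [Bool.false_eq_true, if_false, this, List.length_cons]
      push_cast; ring

theorem find_append_mem (d c : Char) (p : List Char) (h : d ∈ p) :
    PySem.Chars.find (p ++ [c]) [d] = PySem.Chars.find p [d] := by
  simp [PySem.Chars.find, find_go_append_mem d c p h]

theorem find_append_not_mem (c : Char) (p : List Char) (h : c ∉ p) :
    PySem.Chars.find (p ++ [c]) [c] = (p.length : Int) := by
  simp [PySem.Chars.find, find_go_append_not_mem c p h]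

-- rfind.go s sub n checks drop n first, then n-1, …
theorem rfind_go_congr (d c : Char) (p : List Char) (hdc : d ≠ c) (n : Nat) (hn : n ≤ p.length) :
    PySem.Chars.rfind.go (p ++ [c]) [d] n = PySem.Chars.rfind.go p [d] n := by
  induction n with
  | zero =>
      simp only [PySem.Chars.rfind.go]
      cases p with
      | nil => simp [List.isPrefixOf, hdc]
      | cons a t => simp [List.isPrefixOf]
  | succ j ih =>
      have hj : j ≤ p.length := Nat.le_of_succ_le hn
      simp only [PySem.Chars.rfind.go]
      by_cases hlt : j + 1 < p.length
      · have hne : p.drop (j+1) ≠ [] := by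
          intro he; have := List.drop_eq_nil_iff.mp he; omega
        rw [List.drop_append_of_le_length (by omega)]
        cases hp : p.drop (j+1) with
        | nil => exact absurd hp hne
        | cons a t => simp [List.isPrefixOf, ih hj]
      · have he : j + 1 = p.length := by omega
        have h1 : (p ++ [c]).drop (j+1) = [c] := by
          rw [List.drop_append_of_le_length (by omega), he]; simp
        have h2 : p.drop (j+1) = [] := by rw [he]; simp
        rw [h1, h2]
        simp [List.isPrefixOf, hdc, ih hj]

theorem rfind_append_ne (d c : Char) (p : List Char) (hdc : d ≠ c) :
    PySem.Chars.rfind (p ++ [c]) [d] = PySem.Chars.rfind p [d] := by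
  have hstep : PySem.Chars.rfind.go (p ++ [c]) [d] (p.length + 1)
      = PySem.Chars.rfind.go (p ++ [c]) [d] p.length := by
    simp only [PySem.Chars.rfind.go]
    have h1 : (p ++ [c]).drop (p.length + 1) = [] := by simp
    rw [h1]; simp [List.isPrefixOf]
  simp only [PySem.Chars.rfind, List.length_append, List.length_cons, List.length_nil, Nat.zero_add]
  rw [hstep, rfind_go_congr d c p hdc p.length le_rfl]

theorem rfind_append_self (c : Char) (p : List Char) :
    PySem.Chars.rfind (p ++ [c]) [c] = (p.length : Int) := by
  have hstep : PySem.Chars.rfind.go (p ++ [c]) [c] (p.length + 1)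
      = PySem.Chars.rfind.go (p ++ [c]) [c] p.length := by
    simp only [PySem.Chars.rfind.go]
    have h1 : (p ++ [c]).drop (p.length + 1) = [] := by simp
    rw [h1]; simp [List.isPrefixOf]
  have hstep2 : PySem.Chars.rfind.go (p ++ [c]) [c] p.length = (p.length : Int) := by
    cases hp : p.length with
    | zero =>
        have hpe : p = [] := List.length_eq_zero_iff.mp hp
        subst hpe
        simp [PySem.Chars.rfind.go, List.isPrefixOf]
    | succ j =>
        simp only [PySem.Chars.rfind.go]
        have h1 : (p ++ [c]).drop (j + 1) = [c] := by
          rw [List.drop_append_of_le_length (by omega)]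
          rw [show j + 1 = p.length from hp.symm]
          simp
        rw [h1]
        simp [List.isPrefixOf]
  simp only [PySem.Chars.rfind, List.length_append, List.length_cons, List.length_nil, Nat.zero_add]
  rw [hstep, hstep2]

theorem dedup_append (p : List Char) (c : Char) :
    PySem.List.dedup (p ++ [c]) =
      if c ∈ p then PySem.List.dedup p else PySem.List.dedup p ++ [c] := by
  simp only [PySem.List.dedup_eq_ofList, PySem.Set.ofList_eq_foldl, List.foldl_append,
    List.foldl_cons, List.foldl_nil]
  rw [← PySem.Set.ofList_eq_foldl]
  by_cases h : c ∈ p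
  · simp [PySem.Set.add, h]
  · simp [PySem.Set.add, h]

-- one step of A's loop, at index p.length of the string p ++ [c]
theorem step_items (p : List Char) (c : Char) (D : PySem.Dict String (List Int))
    (hD : D.items = intervalsOf p) :
    (buildStepA (p ++ [c]) D ((p.length : Nat) : Int)).items = intervalsOf (p ++ [c]) := by
  have hget : PySem.List.pyGet? (p ++ [c]) ((p.length : Nat) : Int) = some c := by
    rw [PySem.List.pyGet?_natCast]
    simp
  have hkeys : D.keys = (PySem.List.dedup p).map (fun d => String.ofList [d]) := by
    simp only [PySem.Dict.keys, hD, intervalsOf, List.map_map]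
    rfl
  have hnodup : D.keys.Nodup := by
    rw [hkeys]
    exact (PySem.List.nodup_dedup p).map keyOf_inj
  by_cases hc : c ∈ p
  · -- key present: modify branch
    have hmemdedup : c ∈ PySem.List.dedup p := (PySem.List.mem_dedup p c).mpr hc
    have hmemitems : (String.ofList [c], [PySem.Chars.find p [c], PySem.Chars.rfind p [c] + 1]) ∈ D.items := by
      rw [hD]
      exact List.mem_map_of_mem hmemdedup
    have hget? : D.get? (String.ofList [c]) = some [PySem.Chars.find p [c], PySem.Chars.rfind p [c] + 1] :=
      PySem.Dict.get?_of_mem_items D hmemitems hnodup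
    have hcontains : D.contains (String.ofList [c]) = true := by
      rw [PySem.Dict.contains_eq_isSome_get?, hget?]; rfl
    unfold buildStepA
    rw [hget]
    dsimp only
    rw [hget?]
    dsimp only
    simp only [PySem.Dict.modify, PySem.Dict.getD_of_get?_eq_some D [] hget?]
    rw [PySem.Dict.items_insert_of_contains D _ hcontains, hD]
    simp only [intervalsOf, dedup_append, hc, if_true, List.map_map]
    apply List.map_congr_left
    intro d hd
    by_cases hdc : d = c
    · subst hdc
      simp [List.set, rfind_append_self]
      exact (find_append_mem d d p hc).symm
    · have hne : (String.ofList [d] == String.ofList [c]) = false := by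
        simp only [beq_eq_false_iff_ne, ne_eq]
        intro he; exact hdc (keyOf_inj he)
      have hdp : d ∈ p := (PySem.List.mem_dedup p d).mp hd
      simp [Function.comp, hne, find_append_mem d c p hdp, rfind_append_ne d c p hdc]
  · -- key absent: insert branch
    have hget? : D.get? (String.ofList [c]) = none := by
      rw [PySem.Dict.get?_eq_none_iff_not_mem_keys, hkeys]
      intro hmem
      rcases List.mem_map.mp hmem with ⟨d, hd, he⟩
      have hdc : d = c := keyOf_inj he
      exact hc (hdc ▸ (PySem.List.mem_dedup p d).mp hd)
    have hcontains : D.contains (String.ofList [c]) = false := by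
      rw [PySem.Dict.contains_eq_isSome_get?, hget?]; rfl
    unfold buildStepA
    rw [hget]
    dsimp only
    rw [hget?]
    dsimp only
    rw [PySem.Dict.items_insert_of_not_contains D _ hcontains, hD]
    simp only [intervalsOf, dedup_append, hc, if_false, List.map_append]
    congr 1
    · apply List.map_congr_left
      intro d hd
      have hdp : d ∈ p := (PySem.List.mem_dedup p d).mp hd
      have hdc : d ≠ c := fun he => hc (he ▸ hdp)
      rw [find_append_mem d c p hdp, rfind_append_ne d c p hdc]
    · simp [find_append_not_mem c p hc, rfind_append_self]

theorem main_items (cs : List Char) :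
    ((PySem.List.pyRange 0 cs.length 1).foldl (buildStepA cs) PySem.Dict.empty).items
      = intervalsOf cs := by
  induction cs using List.reverseRecOn with
  | nil => simp [PySem.List.pyRange, intervalsOf, PySem.List.dedup, PySem.Set.ofList,
      PySem.Dict.empty]
  | append_singleton p c ih =>
      have hlen : ((p ++ [c]).length : Int) = (p.length : Int) + 1 := by simp
      rw [hlen, PySem.List.pyRange_one_succ_right (by positivity), List.foldl_append,
        List.foldl_cons, List.foldl_nil]
      have hcongr : (PySem.List.pyRange 0 (p.length : Int) 1).foldl (buildStepA (p ++ [c])) PySem.Dict.empty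
          = (PySem.List.pyRange 0 (p.length : Int) 1).foldl (buildStepA p) PySem.Dict.empty := by
        apply PySem.List.foldl_congr_mem
        intro acc i hi
        have hib := PySem.List.mem_pyRange_one.mp hi
        have h0 : i = ((i.toNat : Nat) : Int) := by omega
        have hlt : i.toNat < p.length := by omega
        unfold buildStepA
        rw [h0, PySem.List.pyGet?_natCast, PySem.List.pyGet?_natCast,
          List.getElem?_append_left hlt]
      rw [hcongr]
      exact step_items p c _ ih

theorem alt_eq_intervalsOf (S : String) : build_intervals_dict_alt S = intervalsOf S.toList := by
  unfold build_intervals_dict_alt intervalsOf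
  apply List.map_congr_left
  intro c _
  simp [PySem.Str.find_eq, PySem.Str.rfind_eq]

-- ===== VERDICT (by name: the statement is the Claim_ definition above) =====
theorem build_intervals_dict_spec : Claim_equal_build_intervals_dict := by
  intro S _
  unfold Spec_build_intervals_dict build_intervals_dict
  rw [alt_eq_intervalsOf, PySem.Str.len_eq]
  exact main_items S.toList
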